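-- pv_equiv track=rewrite | github.com/World-Ablaze/world-ablaze-beta | tools/ai_will_do_replacer_land.py | has_excessive_blank_lines
-- ===== SOURCE A (Python) =====
-- def has_excessive_blank_lines(ai_will_do_block: str) -> bool:
--     """
--     Check if an ai_will_do block has excessive blank lines (more than one consecutive blank line).
--     """
--     lines = ai_will_do_block.split('\n')
--     consecutive_blanks = 0
--     for line in lines:
--         if line.strip() == '':
--             consecutive_blanks += 1
--             if consecutive_blanks > 1:
--                 return True
--         else:
--             consecutive_blanks = 0
--     return False
-- ===== SOURCE B (Python) =====
-- def has_excessive_blank_lines(ai_will_do_block: str) -> bool: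
--     lines = ai_will_do_block.split('\n')
--     return any(a.strip() == '' and b.strip() == ''
--                for a, b in zip(lines, lines[1:]))
-- ===== Notes on version B (the rewrite author's own statement) =====
-- stated objective: idiomatic
-- what changed: Replaced the stateful consecutive-blank counter with early return by a stateless one-liner: any() over adjacent line pairs from zip(lines, lines[1:]) testing both blank.
import Mathlib
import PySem

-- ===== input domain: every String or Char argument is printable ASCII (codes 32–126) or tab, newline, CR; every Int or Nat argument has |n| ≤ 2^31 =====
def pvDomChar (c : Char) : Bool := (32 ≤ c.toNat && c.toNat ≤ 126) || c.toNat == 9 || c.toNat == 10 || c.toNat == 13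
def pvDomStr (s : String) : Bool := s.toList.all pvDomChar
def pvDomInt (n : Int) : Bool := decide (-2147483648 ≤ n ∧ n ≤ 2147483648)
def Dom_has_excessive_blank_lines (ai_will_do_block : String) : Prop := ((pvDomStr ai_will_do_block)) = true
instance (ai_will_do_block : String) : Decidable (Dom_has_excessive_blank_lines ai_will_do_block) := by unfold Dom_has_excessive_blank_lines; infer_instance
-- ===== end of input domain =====

-- B: the stateful consecutive-blank counter is replaced by a stateless any() over adjacent line pairs (idiomatic; same cost).
-- ===== PORT A =====
def pvALoop : List String → Int → Bool
  | [], _ => false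
  | line :: rest, consecutive_blanks =>
    if PySem.Str.strip line == "" then
      if consecutive_blanks + 1 > 1 then true
      else pvALoop rest (consecutive_blanks + 1)
    else pvALoop rest 0

def has_excessive_blank_lines (ai_will_do_block : String) : Bool :=
  -- s.split('\n') with a nonempty separator always succeeds; split? is none only for sep = ""
  let lines := (PySem.Str.split? ai_will_do_block "\n").getD []
  pvALoop lines 0

-- ===== PORT B =====
def has_excessive_blank_lines_alt (ai_will_do_block : String) : Bool :=
  let lines := (PySem.Str.split? ai_will_do_block "\n").getD []
  (lines.zip (PySem.List.slice lines (some 1) none)).any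
    (fun p => PySem.Str.strip p.1 == "" && PySem.Str.strip p.2 == "")

-- ===== PRECONDITION & SPEC =====
def Spec_has_excessive_blank_lines (ai_will_do_block : String) (out : Bool) : Prop := out = has_excessive_blank_lines_alt ai_will_do_block
instance (ai_will_do_block : String) (out : Bool) : Decidable (Spec_has_excessive_blank_lines ai_will_do_block out) := by unfold Spec_has_excessive_blank_lines; infer_instance

-- ===== CLAIM (what is proved, stated in full; the proofs are below) =====
def Claim_equal_has_excessive_blank_lines : Prop := ∀ (ai_will_do_block : String), Dom_has_excessive_blank_lines ai_will_do_block → Spec_has_excessive_blank_lines ai_will_do_block (has_excessive_blank_lines ai_will_do_block)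

-- ===== LEMMAS AND PROOFS =====

-- ===== VERDICT (by name: the statement is the Claim_ definition above) =====
def pvBlank (l : String) : Bool := PySem.Str.strip l == ""

def pvPairAny (ls : List String) : Bool :=
  (ls.zip ls.tail).any (fun p => pvBlank p.1 && pvBlank p.2)

lemma pvPairAny_cons (l l' : String) (ls' : List String) :
    pvPairAny (l :: l' :: ls') = ((pvBlank l && pvBlank l') || pvPairAny (l' :: ls')) := by
  simp [pvPairAny]

lemma pvLoop_eq (ls : List String) : pvALoop ls 0 = pvPairAny ls := by
  induction ls with
  | nil => rfl
  | cons l ls ih =>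
    cases ls with
    | nil =>
      simp only [pvALoop, pvPairAny, pvBlank]
      split <;> rfl
    | cons l' ls' =>
      rw [pvPairAny_cons, ← ih]
      by_cases hl : pvBlank l = true
      · by_cases hl' : pvBlank l' = true
        · simp only [pvBlank] at hl hl'
          simp [pvALoop, hl, hl', pvBlank]
        · simp only [pvBlank, Bool.not_eq_true] at hl hl'
          simp [pvALoop, hl, hl', pvBlank]
      · simp only [pvBlank, Bool.not_eq_true] at hl
        simp [pvALoop, hl, pvBlank]

theorem has_excessive_blank_lines_spec : Claim_equal_has_excessive_blank_lines := by
  intro s _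
  unfold Spec_has_excessive_blank_lines has_excessive_blank_lines has_excessive_blank_lines_alt
  simp only [PySem.List.slice_from_one]
  exact pvLoop_eq _
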